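-- pv_equiv track=rewrite | github.com/MarksonArguello/test-design | trab3/codigo_adicional/src/banco_fila.py | banco
-- ===== SOURCE A (Python) =====
-- def banco(C, N, L):
--   caixalist = [0] * C
--   result = 0
--   for ccc in L:
--     valor = min(caixalist)
--     indice = caixalist.index(valor)
--     caixalist[indice] += ccc[1]
--     if valor - ccc[0] >= 20:
--       result += 1
--   return result
-- ===== SOURCE B (Python) =====
-- def banco(C, N, L):
--   # tellers kept as a lexicographically sorted list of (load, index) pairs:
--   # the least-loaded teller (first index on ties) is always tellers[0];
--   # re-insertion position found by binary search.
--   tellers = [(0, i) for i in range(C)]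
--   result = 0
--   for a, b in L:
--     v, i = tellers.pop(0)
--     if v - a >= 20:
--       result += 1
--     nv = (v + b, i)
--     lo = 0
--     hi = len(tellers)
--     while lo < hi:
--       mid = (lo + hi) // 2
--       if tellers[mid] < nv:
--         lo = mid + 1
--       else:
--         hi = mid
--     tellers.insert(lo, nv)
--   return result
-- ===== Notes on version B (the rewrite author's own statement) =====
-- stated objective: faster
-- what changed: B keeps the tellers as a lexicographically sorted list of (load, index) pairs used as a priority queue: the minimum is popped from the head and the updated teller is re-inserted at a position found by binary search, replacing A's per-customer min() scan plus .index() scan over the load list.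
import Mathlib
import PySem

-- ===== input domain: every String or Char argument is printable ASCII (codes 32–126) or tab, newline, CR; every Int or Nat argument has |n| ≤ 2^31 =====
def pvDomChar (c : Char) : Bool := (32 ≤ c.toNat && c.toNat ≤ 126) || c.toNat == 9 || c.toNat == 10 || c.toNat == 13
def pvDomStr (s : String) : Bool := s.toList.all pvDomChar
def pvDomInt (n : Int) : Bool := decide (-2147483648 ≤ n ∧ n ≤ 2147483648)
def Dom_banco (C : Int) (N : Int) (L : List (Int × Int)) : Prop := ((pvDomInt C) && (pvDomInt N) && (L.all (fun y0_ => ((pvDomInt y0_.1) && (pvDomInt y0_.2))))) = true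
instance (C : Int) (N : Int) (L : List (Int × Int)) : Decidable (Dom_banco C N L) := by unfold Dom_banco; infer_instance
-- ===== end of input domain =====

-- B replaces A's per-customer min()+index() scans by a lexicographically sorted
-- list of (load, index) pairs kept as a priority queue (min = head, sorted insert);
-- objective: alternative algorithm, same exact results.

-- ===== PORT A =====
-- one iteration of A's for-loop: valor = min(caixalist); indice = caixalist.index(valor);
-- caixalist[indice] += ccc[1]; result += 1 if valor - ccc[0] >= 20
def bancoStepA (st : List Int × Int) (ccc : Int × Int) : List Int × Int :=
  match PySem.List.min? st.1 (fun x => x) with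
  | none => st          -- min([]) raises ValueError in Python; unreachable under Pre_banco
  | some valor =>
    match PySem.List.index? st.1 valor with
    | none => st        -- unreachable: valor ∈ st.1
    | some indice =>
      (st.1.set indice (st.1.getD indice 0 + ccc.2),
       st.2 + (if valor - ccc.1 ≥ 20 then 1 else 0))

def banco (C : Int) (N : Int) (L : List (Int × Int)) : Int :=
  (L.foldl bancoStepA (List.replicate C.toNat 0, 0)).2

-- ===== PORT B =====
-- Python tuple comparison tellers[mid] < nv on (load, index) pairs
def lexLt (q p : Int × Int) : Bool := q.1 < p.1 || (q.1 == p.1 && q.2 < p.2)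

-- Source B's while-loop binary search: first position lo with not (tellers[lo] < nv).
-- tellers[mid] is ported as getD: exact here since lo < hi ≤ len always holds
-- at the call sites (initial hi = len(tellers)), so mid is in range as in Python.
def bsearch (tellers : List (Int × Int)) (nv : Int × Int) (lo hi : Nat) : Nat :=
  if h : lo < hi then
    let mid := (lo + hi) / 2
    if lexLt (tellers.getD mid (0, 0)) nv then bsearch tellers nv (mid + 1) hi
    else bsearch tellers nv lo mid
  else lo
termination_by hi - lo
decreasing_by all_goals omega

-- one iteration of B's for-loop: pop head (least (load, index)), count,
-- binary-search the insertion point, list.insert there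
def bancoStepB (st : List (Int × Int) × Int) (ccc : Int × Int) : List (Int × Int) × Int :=
  match st.1 with
  | [] => st            -- tellers.pop(0) raises IndexError in Python; unreachable under Pre_banco
  | (v, i) :: rest =>
      ((rest.insertIdx (bsearch rest (v + ccc.2, i) 0 rest.length) (v + ccc.2, i)),
       st.2 + (if v - ccc.1 ≥ 20 then 1 else 0))

def banco_alt (C : Int) (N : Int) (L : List (Int × Int)) : Int :=
  (L.foldl bancoStepB ((PySem.List.pyRange 0 C 1).map (fun i => ((0 : Int), i)), 0)).2

-- ===== PRECONDITION & SPEC =====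
-- Pre_ excludes only the inputs where Python A raises: with C ≤ 0 and a nonempty L,
-- min([]) raises ValueError (and B's tellers.pop(0) raises IndexError there too).
def Pre_banco (C : Int) (N : Int) (L : List (Int × Int)) : Prop := L = [] ∨ 1 ≤ C
instance (C : Int) (N : Int) (L : List (Int × Int)) : Decidable (Pre_banco C N L) := by unfold Pre_banco; infer_instance

def pvWitness_banco : Int × Int × (List (Int × Int)) := (2, 3, [(5, 30), (-25, 10), (3, 4)])

def Spec_banco (C : Int) (N : Int) (L : List (Int × Int)) (out : Int) : Prop := out = banco_alt C N L
instance (C : Int) (N : Int) (L : List (Int × Int)) (out : Int) : Decidable (Spec_banco C N L out) := by unfold Spec_banco; infer_instance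

-- ===== CLAIM (what is proved, stated in full; the proofs are below) =====
def Claim_equal_banco : Prop := ∀ (C : Int) (N : Int) (L : List (Int × Int)), Dom_banco C N L → Pre_banco C N L → Spec_banco C N L (banco C N L)

-- ===== LEMMAS AND PROOFS =====

-- (x, s) pairs of A's load list with its (Int) positions, starting at position s
def pvEnum (xs : List Int) (s : Int) : List (Int × Int) :=
  match xs with
  | [] => []
  | x :: t => (x, s) :: pvEnum t (s + 1)

-- non-strict lexicographic order used for B's sortedness invariant
def lexLe (p q : Int × Int) : Prop := lexLt q p = false

-- proof-side ordered insert: what Source B's bsearch + insert amounts to on a sorted list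
def insLex (p : Int × Int) : List (Int × Int) → List (Int × Int)
  | [] => [p]
  | q :: rest => if lexLt q p then q :: insLex p rest else p :: q :: rest

-- number of leading elements < nv
def lowb (l : List (Int × Int)) (nv : Int × Int) : Nat :=
  (l.takeWhile (fun q => lexLt q nv)).length

theorem lexLt_iff (q p : Int × Int) : lexLt q p = true ↔ (q.1 < p.1 ∨ (q.1 = p.1 ∧ q.2 < p.2)) := by
  simp [lexLt]

theorem lexLe_iff (p q : Int × Int) : lexLe p q ↔ (p.1 < q.1 ∨ (p.1 = q.1 ∧ p.2 ≤ q.2) ∨ (p.1 = q.1 ∧ p.2 = q.2)) := by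
  simp [lexLe, lexLt]; omega

theorem lexLe_refl (p : Int × Int) : lexLe p p := by rw [lexLe_iff]; omega

theorem lexLe_trans {p q r : Int × Int} (h1 : lexLe p q) (h2 : lexLe q r) : lexLe p r := by
  rw [lexLe_iff] at *; omega

theorem lexLe_of_lexLt {q p : Int × Int} (h : lexLt q p = true) : lexLe q p := by
  rw [lexLt_iff] at h; rw [lexLe_iff]; omega

theorem length_pvEnum (xs : List Int) (s : Int) : (pvEnum xs s).length = xs.length := by
  induction xs generalizing s with
  | nil => rfl
  | cons x t ih => simp [pvEnum, ih]

theorem mem_pvEnum {xs : List Int} {s : Int} {p : Int × Int} (h : p ∈ pvEnum xs s) :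
    ∃ k, ∃ hk : k < xs.length, xs[k] = p.1 ∧ p.2 = s + k := by
  induction xs generalizing s with
  | nil => simp [pvEnum] at h
  | cons x t ih =>
    simp only [pvEnum, List.mem_cons] at h
    rcases h with h | h
    · exact ⟨0, by simp, by simp [h]⟩
    · obtain ⟨k, hk, h1, h2⟩ := ih h
      exact ⟨k + 1, by simpa using hk, by simpa using h1, by omega⟩

theorem pvEnum_mem_of_getElem {xs : List Int} {s : Int} {k : Nat} (hk : k < xs.length) :
    (xs[k], s + (k : Int)) ∈ pvEnum xs s := by
  induction xs generalizing s k with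
  | nil => simp at hk
  | cons x t ih =>
    cases k with
    | zero => simp [pvEnum]
    | succ k =>
      simp only [pvEnum, List.mem_cons]
      right
      have := ih (s := s + 1) (k := k) (by simpa using hk)
      simpa [add_assoc, add_comm, add_left_comm] using this

theorem pvEnum_set (xs : List Int) (s : Int) (k : Nat) (x : Int) (hk : k < xs.length) :
    pvEnum (xs.set k x) s = (pvEnum xs s).set k (x, s + k) := by
  induction xs generalizing s k with
  | nil => simp at hk
  | cons y t ih =>
    cases k with
    | zero => simp [pvEnum]
    | succ k =>
      simp only [List.set_cons_succ, pvEnum, List.set]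
      rw [ih (s + 1) k (by simpa using hk)]
      norm_num [add_assoc, add_comm, add_left_comm]

theorem set_perm_cons_eraseIdx {α : Type} (l : List α) (k : Nat) (x : α) (hk : k < l.length) :
    (l.set k x).Perm (x :: l.eraseIdx k) := by
  rw [List.set_eq_take_append_cons_drop, if_pos hk, List.eraseIdx_eq_take_drop_succ]
  exact List.perm_middle

theorem pvEnum_erase_eq_eraseIdx (xs : List Int) (s : Int) (k : Nat) (x : Int)
    (hk : k < xs.length) (hx : xs[k] = x) :
    (pvEnum xs s).erase (x, s + (k : Int)) = (pvEnum xs s).eraseIdx k := by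
  induction xs generalizing s k with
  | nil => simp at hk
  | cons y t ih =>
    cases k with
    | zero =>
      simp only [List.getElem_cons_zero] at hx
      simp [pvEnum, hx]
    | succ k =>
      have hne : ((y, s) : Int × Int) ≠ (x, s + ((k : Int) + 1)) := by
        intro h
        have := congrArg Prod.snd h
        simp at this; omega
      simp only [pvEnum]
      rw [List.erase_cons_tail (by simpa using hne)]
      have := ih (s + 1) k (by simpa using hk) (by simpa using hx)
      rw [List.eraseIdx_cons_succ]
      congr 1
      have harg : s + ((k : Nat) + 1 : Nat) = (s + 1) + (k : Int) := by push_cast; ring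
      rw [harg]
      exact this

theorem insLex_perm (p : Int × Int) (l : List (Int × Int)) : (insLex p l).Perm (p :: l) := by
  induction l with
  | nil => simp [insLex]
  | cons q rest ih =>
    simp only [insLex]
    split
    · exact (ih.cons q).trans (List.Perm.swap p q rest)
    · exact List.Perm.refl _

theorem insLex_sorted (p : Int × Int) (l : List (Int × Int)) (hs : l.Pairwise lexLe) :
    (insLex p l).Pairwise lexLe := by
  induction l with
  | nil => simp [insLex]
  | cons q rest ih =>
    rw [List.pairwise_cons] at hs
    obtain ⟨hq, hrest⟩ := hs
    simp only [insLex]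
    split
    · rename_i hlt
      rw [List.pairwise_cons]
      refine ⟨?_, ih hrest⟩
      intro x hx
      have : x ∈ p :: rest := (insLex_perm p rest).mem_iff.1 hx
      rcases List.mem_cons.1 this with h | h
      · exact h ▸ lexLe_of_lexLt hlt
      · exact hq x h
    · rename_i hnlt
      have hpq : lexLe p q := by
        simp only [Bool.not_eq_true] at hnlt
        exact hnlt
      rw [List.pairwise_cons]
      refine ⟨?_, List.pairwise_cons.2 ⟨hq, hrest⟩⟩
      intro x hx
      rcases List.mem_cons.1 hx with h | h
      · exact h ▸ hpq
      · exact lexLe_trans hpq (hq x h)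

theorem lexLt_of_le_of_lt {a b c : Int × Int} (h1 : lexLe a b) (h2 : lexLt b c = true) :
    lexLt a c = true := by
  rw [lexLe_iff] at h1
  rw [lexLt_iff] at h2 ⊢
  omega

theorem lowb_eq_of (l : List (Int × Int)) (nv : Int × Int) : ∀ (c : Nat), c ≤ l.length →
    (∀ j (hj : j < l.length), j < c → lexLt l[j] nv = true) →
    (∀ j (hj : j < l.length), c ≤ j → lexLt l[j] nv = false) →
    lowb l nv = c := by
  induction l with
  | nil =>
    intro c hc _ _
    simp only [List.length_nil, Nat.le_zero] at hc
    subst hc; rfl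
  | cons q t ih =>
    intro c hc h1 h2
    cases c with
    | zero =>
      have h0 : lexLt q nv = false := h2 0 (by simp) (Nat.le_refl 0)
      simp [lowb, List.takeWhile_cons, h0]
    | succ c =>
      have h0 : lexLt q nv = true := h1 0 (by simp) (Nat.succ_pos c)
      have ht : lowb t nv = c := by
        apply ih c (by simpa using hc)
        · intro j hj hjc
          have := h1 (j + 1) (by simpa using hj) (by omega)
          simpa using this
        · intro j hj hjc
          have := h2 (j + 1) (by simpa using hj) (by omega)
          simpa using this
      simp [lowb, List.takeWhile_cons, h0]
      simpa [lowb] using ht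

theorem insLex_eq_insertIdx (p : Int × Int) (l : List (Int × Int)) :
    l.insertIdx (lowb l p) p = insLex p l := by
  induction l with
  | nil => rfl
  | cons q t ih =>
    by_cases h : lexLt q p = true
    · have hl : lowb (q :: t) p = lowb t p + 1 := by simp [lowb, List.takeWhile_cons, h]
      rw [hl, List.insertIdx_succ_cons, ih]
      simp [insLex, h]
    · have hl : lowb (q :: t) p = 0 := by
        simp [lowb, List.takeWhile_cons, Bool.eq_false_iff.2 h]
      rw [hl]
      simp [insLex, Bool.eq_false_iff.2 h]

theorem bsearch_eq_lowb (l : List (Int × Int)) (nv : Int × Int) (hsort : l.Pairwise lexLe) :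
    ∀ (n lo hi : Nat), hi - lo ≤ n → hi ≤ l.length → lo ≤ hi →
    (∀ j (hj : j < l.length), j < lo → lexLt l[j] nv = true) →
    (∀ j (hj : j < l.length), hi ≤ j → lexLt l[j] nv = false) →
    bsearch l nv lo hi = lowb l nv := by
  have hmono : ∀ i j (hi : i < l.length) (hj : j < l.length), i ≤ j → lexLe l[i] l[j] := by
    intro i j hi hj hij
    rcases Nat.eq_or_lt_of_le hij with h | h
    · subst h; exact lexLe_refl _
    · exact (List.pairwise_iff_getElem.1 hsort) i j hi hj h
  intro n
  induction n with
  | zero =>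
    intro lo hi hfuel hhi hlh h1 h2
    rw [bsearch, dif_neg (by omega)]
    exact (lowb_eq_of l nv lo (by omega) h1 (fun j hj hge => h2 j hj (by omega))).symm
  | succ n ih =>
    intro lo hi hfuel hhi hlh h1 h2
    rw [bsearch]
    by_cases h : lo < hi
    · rw [dif_pos h]
      show (if lexLt (l.getD ((lo + hi) / 2) (0, 0)) nv = true
            then bsearch l nv ((lo + hi) / 2 + 1) hi
            else bsearch l nv lo ((lo + hi) / 2)) = lowb l nv
      have hmidlt : (lo + hi) / 2 < hi := by omega
      have hmidlen : (lo + hi) / 2 < l.length := by omega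
      have hmidlo : lo ≤ (lo + hi) / 2 := by omega
      rw [List.getD_eq_getElem l (0, 0) hmidlen]
      by_cases hcase : lexLt l[(lo + hi) / 2] nv = true
      · rw [if_pos hcase]
        apply ih ((lo + hi) / 2 + 1) hi (by omega) hhi (by omega)
        · intro j hj hjlt
          exact lexLt_of_le_of_lt (hmono j ((lo + hi) / 2) hj hmidlen (by omega)) hcase
        · exact h2
      · rw [if_neg hcase]
        apply ih lo ((lo + hi) / 2) (by omega) (by omega) (by omega) h1
        intro j hj hjge
        by_contra hc
        rw [Bool.not_eq_false] at hc
        exact hcase (lexLt_of_le_of_lt (hmono ((lo + hi) / 2) j hmidlen hj hjge) hc)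
    · rw [dif_neg h]
      have : lo = hi := by omega
      subst this
      exact (lowb_eq_of l nv lo (by omega) h1 (fun j hj hge => h2 j hj hge)).symm

-- the key coupling step: one customer preserves the invariant and produces equal counters
theorem step_rel (caixa : List Int) (ts : List (Int × Int)) (r : Int) (ccc : Int × Int)
    (hp : ts.Perm (pvEnum caixa 0)) (hs : ts.Pairwise lexLe) (hne : caixa ≠ []) :
    (bancoStepA (caixa, r) ccc).2 = (bancoStepB (ts, r) ccc).2 ∧
    ((bancoStepA (caixa, r) ccc).1).length = caixa.length ∧
    (bancoStepB (ts, r) ccc).1.Perm (pvEnum (bancoStepA (caixa, r) ccc).1 0) ∧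
    (bancoStepB (ts, r) ccc).1.Pairwise lexLe := by
  -- ts is nonempty
  have hlen : ts.length = caixa.length := by
    rw [hp.length_eq, length_pvEnum]
  rcases ts with _ | ⟨⟨v, i⟩, rest⟩
  · exact absurd (List.length_eq_zero_iff.1 hlen.symm) hne
  -- head is ≤ every pair of pvEnum caixa 0
  have hhead_le : ∀ p ∈ pvEnum caixa 0, lexLe (v, i) p := by
    intro p hpm
    have hpts : p ∈ (v, i) :: rest := hp.symm.subset hpm
    rcases List.mem_cons.1 hpts with h | h
    · exact h ▸ lexLe_refl _
    · exact (List.pairwise_cons.1 hs).1 p h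
  -- the head comes from position k of caixa
  have hmemv : ((v, i) : Int × Int) ∈ pvEnum caixa 0 := hp.subset (by simp)
  obtain ⟨k, hk, hvk, hik⟩ := mem_pvEnum hmemv
  simp only at hvk hik
  have hik' : i = (k : Int) := by omega
  -- min? caixa = some v
  have hvmem : v ∈ caixa := hvk ▸ List.getElem_mem hk
  have hminsome : (PySem.List.min? caixa (fun x => x)).isSome := by
    rcases h : PySem.List.min? caixa (fun x : Int => x) with _ | m
    · exact absurd ((PySem.List.min?_eq_none_iff _ _).1 h) hne
    · simp
  obtain ⟨m, hm⟩ := Option.isSome_iff_exists.1 hminsome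
  have hmv : m = v := by
    have h1 : m ≤ v := PySem.List.min?_isMin hm v hvmem
    have h2 : v ≤ m := by
      have hmmem : m ∈ caixa := PySem.List.min?_mem hm
      obtain ⟨j, hj, hmj⟩ := List.mem_iff_getElem.1 hmmem
      have := hhead_le (caixa[j], (0 : Int) + (j : Int)) (pvEnum_mem_of_getElem hj)
      rw [lexLe_iff] at this
      simp only at this
      omega
    omega
  rw [hmv] at hm
  -- index? caixa v = some k
  have hidxsome : (PySem.List.index? caixa v).isSome :=
    (PySem.List.index?_isSome_iff caixa v).2 hvmem
  obtain ⟨k₀, hk₀⟩ := Option.isSome_iff_exists.1 hidxsome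
  obtain ⟨hk₀lt, hvk₀, hfirst⟩ := PySem.List.getElem_of_index?_eq_some hk₀
  have hkk : k₀ = k := by
    by_contra hne'
    rcases Nat.lt_or_ge k₀ k with hlt | hge
    · -- caixa[k₀] = v with k₀ < k contradicts head-minimality of index
      have := hhead_le (caixa[k₀], (0 : Int) + (k₀ : Int)) (pvEnum_mem_of_getElem hk₀lt)
      rw [lexLe_iff] at this
      simp only [hvk₀] at this
      omega
    · have hlt : k < k₀ := by omega
      exact hfirst k hlt hvk
  subst hkk
  -- now both steps compute
  have hgetD : caixa.getD k₀ 0 = v := by rw [List.getD_eq_getElem caixa 0 hk₀lt, hvk₀]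
  have hstepA : bancoStepA (caixa, r) ccc =
      (caixa.set k₀ (v + ccc.2), r + (if v - ccc.1 ≥ 20 then 1 else 0)) := by
    simp only [bancoStepA, hm, hk₀, hgetD]
  have hrs : rest.Pairwise lexLe := (List.pairwise_cons.1 hs).2
  have hstepB : bancoStepB ((v, i) :: rest, r) ccc =
      (insLex (v + ccc.2, i) rest, r + (if v - ccc.1 ≥ 20 then 1 else 0)) := by
    simp only [bancoStepB]
    rw [bsearch_eq_lowb rest (v + ccc.2, i) hrs rest.length 0 rest.length
          (by omega) (Nat.le_refl _) (Nat.zero_le _)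
          (fun j hj hjlt => absurd hjlt (Nat.not_lt_zero j))
          (fun j hj hge => absurd hj (by omega)),
        insLex_eq_insertIdx]
  rw [hstepA, hstepB]
  refine ⟨rfl, by simp, ?_, ?_⟩
  · -- permutation of the new states
    have hrest : rest.Perm ((pvEnum caixa 0).eraseIdx k₀) := by
      have h1 : (((v, i) :: rest).erase (v, i)).Perm ((pvEnum caixa 0).erase (v, i)) :=
        List.Perm.erase (v, i) hp
      rw [List.erase_cons_head] at h1
      rw [hik', ← zero_add ((k₀ : Int))] at h1
      rwa [pvEnum_erase_eq_eraseIdx caixa 0 k₀ v hk₀lt hvk₀] at h1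
    have h2 : (insLex (v + ccc.2, i) rest).Perm ((v + ccc.2, i) :: rest) :=
      insLex_perm _ _
    have h3 : ((v + ccc.2, i) :: rest).Perm ((v + ccc.2, i) :: (pvEnum caixa 0).eraseIdx k₀) :=
      hrest.cons _
    have h4 : (pvEnum (caixa.set k₀ (v + ccc.2)) 0).Perm
        ((v + ccc.2, i) :: (pvEnum caixa 0).eraseIdx k₀) := by
      rw [pvEnum_set caixa 0 k₀ (v + ccc.2) hk₀lt, hik', ← zero_add ((k₀ : Int))]
      have := set_perm_cons_eraseIdx (pvEnum caixa 0) k₀ ((v + ccc.2, 0 + (k₀ : Int))) (by rw [length_pvEnum]; exact hk₀lt)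
      simpa using this
    exact (h2.trans h3).trans h4.symm
  · exact insLex_sorted _ _ (List.pairwise_cons.1 hs).2

theorem fold_eq (L : List (Int × Int)) : ∀ (caixa : List Int) (ts : List (Int × Int)) (r : Int),
    ts.Perm (pvEnum caixa 0) → ts.Pairwise lexLe → caixa ≠ [] →
    (L.foldl bancoStepA (caixa, r)).2 = (L.foldl bancoStepB (ts, r)).2 := by
  induction L with
  | nil => intro caixa ts r _ _ _; rfl
  | cons c L ih =>
    intro caixa ts r hp hs hne
    obtain ⟨h2, hlen, hperm, hsort⟩ := step_rel caixa ts r c hp hs hne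
    simp only [List.foldl_cons]
    rw [show bancoStepA (caixa, r) c = ((bancoStepA (caixa, r) c).1, (bancoStepA (caixa, r) c).2) from rfl,
        show bancoStepB (ts, r) c = ((bancoStepB (ts, r) c).1, (bancoStepB (ts, r) c).2) from rfl,
        ← h2]
    apply ih
    · exact hperm
    · exact hsort
    · intro h
      apply hne
      have := congrArg List.length h
      simp only [List.length_nil] at this
      rw [hlen] at this
      exact List.length_eq_zero_iff.1 this

theorem init_enum (n : Nat) : ∀ s : Int, pvEnum (List.replicate n 0) s =
    (List.range n).map (fun k : Nat => ((0 : Int), s + (k : Int))) := by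
  induction n with
  | zero => intro s; rfl
  | succ n ih =>
    intro s
    rw [List.replicate_succ, List.range_succ_eq_map]
    simp only [pvEnum, List.map_cons, List.map_map, ih (s + 1)]
    rw [List.cons_eq_cons]
    constructor
    · simp
    · apply List.map_congr_left
      intro k _
      simp only [Function.comp_apply, Nat.succ_eq_add_one]
      congr 1
      push_cast; ring

theorem init_perm (C : Int) :
    ((PySem.List.pyRange 0 C 1).map (fun i => ((0 : Int), i))).Perm
      (pvEnum (List.replicate C.toNat 0) 0) := by
  rw [init_enum C.toNat 0, PySem.List.pyRange_one]
  simp only [List.map_map]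
  apply List.Perm.of_eq
  rw [sub_zero]
  apply List.map_congr_left
  intro k _
  simp [Function.comp]

theorem init_sorted (C : Int) :
    ((PySem.List.pyRange 0 C 1).map (fun i => ((0 : Int), i))).Pairwise lexLe := by
  rw [PySem.List.pyRange_one]
  simp only [List.map_map]
  refine List.Pairwise.map _ ?_ List.pairwise_lt_range
  intro a b hab
  rw [lexLe_iff]
  simp only [Function.comp_apply]
  norm_num
  omega

-- ===== VERDICT (by name: the statement is the Claim_ definition above) =====
theorem banco_spec : Claim_equal_banco := by
  intro C N L _ hpre
  unfold Spec_banco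
  rcases hpre with hL | hC
  · subst hL; rfl
  · have hne : List.replicate C.toNat (0 : Int) ≠ [] := by
      intro h
      have := congrArg List.length h
      simp at this
      omega
    unfold banco banco_alt
    exact fold_eq L (List.replicate C.toNat 0) _ 0 (init_perm C) (init_sorted C) hne
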